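-- pv_equiv track=rewrite | github.com/ArmineGyulazyan/python_lab_level0 | Week2/Day4/problem3.py | max_row_list
-- ===== SOURCE A (Python) =====
-- def max_row_list(matrix):
--     tmp = matrix[0][0]
--     ls = []
--     for row in range(len(matrix)):
--         for col in range(len(matrix[0])):
--             if matrix[row][col] >= tmp:
--                 tmp = matrix[row][col]
--         ls.append(tmp)
--
--     return ls
-- ===== SOURCE B (Python) =====
-- def max_row_list(matrix):
--     ncols = len(matrix[0])
--     row_maxes = [max(row[c] for c in range(ncols)) for row in matrix]
--     out = []
--     run = row_maxes[0]
--     for m in row_maxes: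
--         run = max(run, m)
--         out.append(run)
--     return out
-- ===== Notes on version B (the rewrite author's own statement) =====
-- stated objective: alternative
-- what changed: A interleaves one running max across the whole matrix inside a nested index loop; B decomposes the task into two passes: a per-row maximum (over the first row's column count) followed by a prefix running-max scan over those row maxima.
import Mathlib
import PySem

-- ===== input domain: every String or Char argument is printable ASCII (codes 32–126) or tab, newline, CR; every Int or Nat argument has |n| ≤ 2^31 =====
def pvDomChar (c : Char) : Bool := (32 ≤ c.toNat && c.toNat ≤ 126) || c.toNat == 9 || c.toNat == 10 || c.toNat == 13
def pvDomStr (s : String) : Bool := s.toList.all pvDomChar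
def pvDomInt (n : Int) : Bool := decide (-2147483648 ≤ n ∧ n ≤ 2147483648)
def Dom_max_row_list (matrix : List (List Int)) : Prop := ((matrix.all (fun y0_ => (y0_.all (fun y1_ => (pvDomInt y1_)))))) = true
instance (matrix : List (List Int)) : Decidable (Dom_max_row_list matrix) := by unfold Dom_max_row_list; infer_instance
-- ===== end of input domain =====

-- B replaces A's interleaved nested-loop running max by two passes (per-row maxima, then a prefix-max scan); same cost, different decomposition.

-- ===== PORT A =====
def max_row_list (matrix : List (List Int)) : List Int :=
  ((PySem.List.pyRange 0 (matrix.length : Int) 1).foldl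
    (fun (st : Int × List Int) (row : Int) =>
      let r := PySem.List.pyGetD matrix row []
      let tmp := (PySem.List.pyRange 0 (((PySem.List.pyGetD matrix 0 []).length : Int)) 1).foldl
        (fun tmp col =>
          if PySem.List.pyGetD r col 0 ≥ tmp then PySem.List.pyGetD r col 0 else tmp) st.1
      (tmp, st.2 ++ [tmp]))
    (PySem.List.pyGetD (PySem.List.pyGetD matrix 0 []) 0 0, [])).2

-- ===== PORT B =====
def max_row_list_alt (matrix : List (List Int)) : List Int :=
  let rowMaxes := matrix.map (fun row =>
    (PySem.List.max? ((PySem.List.pyRange 0 (((PySem.List.pyGetD matrix 0 []).length : Int)) 1).map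
        (fun c => PySem.List.pyGetD row c 0)) (fun y => y)).getD 0)
  let run0 := PySem.List.pyGetD rowMaxes 0 0
  (rowMaxes.foldl (fun (st : Int × List Int) m =>
      (max st.1 m, st.2 ++ [max st.1 m])) (run0, [])).2

-- ===== PRECONDITION & SPEC =====
-- A raises IndexError (B IndexError/ValueError) on an empty matrix, an empty first row,
-- or a row shorter than the first row; Pre_ excludes exactly those inputs.
def Pre_max_row_list (matrix : List (List Int)) : Prop :=
  matrix ≠ [] ∧ 0 < (matrix.headD []).length ∧
  ∀ row ∈ matrix, (matrix.headD []).length ≤ row.length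
instance (matrix : List (List Int)) : Decidable (Pre_max_row_list matrix) := by
  unfold Pre_max_row_list; infer_instance

def pvWitness_max_row_list : List (List Int) := [[1, 2], [0, 5, 3]]

def Spec_max_row_list (matrix : List (List Int)) (out : List Int) : Prop := out = max_row_list_alt matrix
instance (matrix : List (List Int)) (out : List Int) : Decidable (Spec_max_row_list matrix out) := by unfold Spec_max_row_list; infer_instance

-- ===== CLAIM (what is proved, stated in full; the proofs are below) =====
def Claim_equal_max_row_list : Prop := ∀ (matrix : List (List Int)), Dom_max_row_list matrix → Pre_max_row_list matrix → Spec_max_row_list matrix (max_row_list matrix)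

-- ===== LEMMAS AND PROOFS =====

-- maximum of a nonempty list (0 for []), A's running-max form
def pvMx : List Int → Int
  | [] => 0
  | x :: t => t.foldl max x

-- the common scan shape: running max over the per-row maxima (first n columns)
def pvScanR (n : Nat) : Int → List (List Int) → List Int
  | _, [] => []
  | t, r :: rs => max t (pvMx (r.take n)) :: pvScanR n (max t (pvMx (r.take n))) rs

-- A's inner column loop, named
def pvInner (n : Nat) (r : List Int) (s : Int) : Int :=
  (PySem.List.pyRange 0 (n : Int) 1).foldl
    (fun tmp col => if PySem.List.pyGetD r col 0 ≥ tmp then PySem.List.pyGetD r col 0 else tmp) s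

-- B's per-row maximum, named
def pvRmax (n : Nat) (row : List Int) : Int :=
  (PySem.List.max? ((PySem.List.pyRange 0 (n : Int) 1).map
      (fun c => PySem.List.pyGetD row c 0)) (fun y => y)).getD 0

lemma pv_foldl_max_max (t : List Int) (a b : Int) :
    t.foldl max (max a b) = max a (t.foldl max b) := by
  induction t generalizing b with
  | nil => rfl
  | cons c t ih => rw [List.foldl_cons, List.foldl_cons, max_assoc]; exact ih (max b c)

lemma pv_foldl_max_mx (l : List Int) (hl : l ≠ []) (s : Int) :
    l.foldl max s = max s (pvMx l) := by
  cases l with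
  | nil => exact absurd rfl hl
  | cons x t => rw [List.foldl_cons]; exact pv_foldl_max_max t s x

lemma pv_take_ne_nil (n : Nat) (r : List Int) (h : n ≤ r.length) (hn : 0 < n) :
    r.take n ≠ [] := by
  have hl : (r.take n).length = n := by simp [h]
  intro he; rw [he] at hl; simp at hl; omega

lemma pv_inner_take (n : Nat) (r : List Int) (h : n ≤ r.length) (s : Int) :
    pvInner n r s = (r.take n).foldl max s := by
  unfold pvInner
  have hlen : (r.take n).length = n := by simp [h]
  have h1 : ∀ (acc : Int), ∀ c ∈ PySem.List.pyRange 0 (n : Int) 1,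
      (if PySem.List.pyGetD r c 0 ≥ acc then PySem.List.pyGetD r c 0 else acc)
        = max acc (PySem.List.pyGetD (r.take n) c 0) := by
    intro acc c hc
    rw [PySem.List.mem_pyRange_one] at hc
    have hcr : c < (r.length : Int) := lt_of_lt_of_le hc.2 (by exact_mod_cast h)
    have hct : c < ((r.take n).length : Int) := by rw [hlen]; exact hc.2
    rw [PySem.List.pyGetD_eq_getElem r 0 hc.1 hcr,
        PySem.List.pyGetD_eq_getElem (r.take n) 0 hc.1 hct,
        List.getElem_take, max_def]
  rw [PySem.List.foldl_congr_mem _ _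
    (fun acc c => max acc (PySem.List.pyGetD (r.take n) c 0)) s h1]
  have h2 := PySem.List.foldl_pyRange_zero_pyGetD' (r.take n) 0 max s
  rw [hlen] at h2
  exact h2

lemma pv_map_take (n : Nat) (r : List Int) (h : n ≤ r.length) :
    (PySem.List.pyRange 0 (n : Int) 1).map (fun c => PySem.List.pyGetD r c 0) = r.take n := by
  have hlen : (r.take n).length = n := by simp [h]
  have h2 := PySem.List.map_pyGetD_pyRange_zero' (r.take n) 0
  rw [hlen] at h2
  rw [← h2]
  apply List.map_congr_left
  intro c hc
  rw [PySem.List.mem_pyRange_one] at hc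
  have hcr : c < (r.length : Int) := lt_of_lt_of_le hc.2 (by exact_mod_cast h)
  have hct : c < ((r.take n).length : Int) := by rw [hlen]; exact hc.2
  rw [PySem.List.pyGetD_eq_getElem r 0 hc.1 hcr,
      PySem.List.pyGetD_eq_getElem (r.take n) 0 hc.1 hct,
      List.getElem_take]

lemma pvRmax_eq (n : Nat) (r : List Int) (h : n ≤ r.length) (hn : 0 < n) :
    pvRmax n r = pvMx (r.take n) := by
  unfold pvRmax
  rw [pv_map_take n r h]
  obtain ⟨x, t, htk⟩ := List.exists_cons_of_ne_nil (pv_take_ne_nil n r h hn)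
  rw [htk, PySem.List.max?_id_cons]
  simp [pvMx]

lemma portA_eq (matrix : List (List Int)) :
    max_row_list matrix
      = (matrix.foldl (fun (st : Int × List Int) r =>
          (pvInner (PySem.List.pyGetD matrix 0 []).length r st.1,
           st.2 ++ [pvInner (PySem.List.pyGetD matrix 0 []).length r st.1]))
          (PySem.List.pyGetD (PySem.List.pyGetD matrix 0 []) 0 0, [])).2 :=
  congrArg Prod.snd (PySem.List.foldl_pyRange_zero_pyGetD' matrix []
    (fun (st : Int × List Int) r =>
      (pvInner (PySem.List.pyGetD matrix 0 []).length r st.1,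
       st.2 ++ [pvInner (PySem.List.pyGetD matrix 0 []).length r st.1]))
    (PySem.List.pyGetD (PySem.List.pyGetD matrix 0 []) 0 0, []))

lemma portB_eq (matrix : List (List Int)) :
    max_row_list_alt matrix
      = ((matrix.map (pvRmax (PySem.List.pyGetD matrix 0 []).length)).foldl
          (fun (st : Int × List Int) m => (max st.1 m, st.2 ++ [max st.1 m]))
          (PySem.List.pyGetD (matrix.map (pvRmax (PySem.List.pyGetD matrix 0 []).length)) 0 0, [])).2 :=
  rfl

lemma pv_scanA (n : Nat) : ∀ (rs : List (List Int)) (t : Int) (acc : List Int),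
    (rs.foldl (fun (st : Int × List Int) r =>
        (max st.1 (pvMx (r.take n)), st.2 ++ [max st.1 (pvMx (r.take n))])) (t, acc)).2
      = acc ++ pvScanR n t rs := by
  intro rs
  induction rs with
  | nil => intro t acc; simp [pvScanR]
  | cons r rs ih =>
    intro t acc
    rw [List.foldl_cons]
    dsimp only
    rw [ih]
    simp [pvScanR]

lemma pv_scanB (n : Nat) (hn : 0 < n) : ∀ (rs : List (List Int)) (t : Int) (acc : List Int),
    (∀ r ∈ rs, n ≤ r.length) →
    ((rs.map (pvRmax n)).foldl
        (fun (st : Int × List Int) m => (max st.1 m, st.2 ++ [max st.1 m])) (t, acc)).2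
      = acc ++ pvScanR n t rs := by
  intro rs
  induction rs with
  | nil => intro t acc _; simp [pvScanR]
  | cons r rs ih =>
    intro t acc h
    rw [List.map_cons, List.foldl_cons]
    dsimp only
    rw [pvRmax_eq n r (h r (List.mem_cons_self)) hn]
    rw [ih _ _ (fun r' hr' => h r' (List.mem_cons_of_mem _ hr'))]
    simp [pvScanR]

-- ===== VERDICT (by name: the statement is the Claim_ definition above) =====
theorem max_row_list_spec : Claim_equal_max_row_list := by
  intro matrix _ hpre
  obtain ⟨hne, hpos, hrows⟩ := hpre
  show max_row_list matrix = max_row_list_alt matrix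
  cases matrix with
  | nil => exact absurd rfl hne
  | cons r0 rest =>
    simp only [List.headD_cons] at hpos hrows
    rw [portA_eq, portB_eq]
    simp only [PySem.List.pyGetD_zero_cons, List.map_cons]
    have hcong : ∀ (st : Int × List Int), ∀ r ∈ r0 :: rest,
        (pvInner r0.length r st.1, st.2 ++ [pvInner r0.length r st.1])
          = (max st.1 (pvMx (r.take r0.length)), st.2 ++ [max st.1 (pvMx (r.take r0.length))]) := by
      intro st r hr
      have hle : r0.length ≤ r.length := hrows r hr
      rw [pv_inner_take r0.length r hle, pv_foldl_max_mx _ (pv_take_ne_nil _ _ hle hpos)]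
    rw [PySem.List.foldl_congr_mem _ _
      (fun (st : Int × List Int) r =>
        (max st.1 (pvMx (r.take r0.length)), st.2 ++ [max st.1 (pvMx (r.take r0.length))])) _ hcong]
    rw [pv_scanA]
    rw [show pvRmax r0.length r0 :: rest.map (pvRmax r0.length)
          = (r0 :: rest).map (pvRmax r0.length) from (List.map_cons ..).symm]
    rw [pv_scanB r0.length hpos (r0 :: rest) _ _ (fun r hr => hrows r hr)]
    rw [List.nil_append, List.nil_append]
    rw [pvRmax_eq r0.length r0 le_rfl hpos]
    have ht0 : PySem.List.pyGetD r0 0 0 ≤ pvMx (r0.take r0.length) := by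
      rw [List.take_length]
      cases r0 with
      | nil => simp at hpos
      | cons x t =>
        rw [PySem.List.pyGetD_zero_cons]
        exact (PySem.List.le_foldl_max t x).1
    show pvScanR r0.length (PySem.List.pyGetD r0 0 0) (r0 :: rest)
        = pvScanR r0.length (pvMx (r0.take r0.length)) (r0 :: rest)
    simp only [pvScanR, max_self, max_eq_right ht0]
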